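-- pv_equiv track=rewrite | github.com/YCorguo/edu_for_dradra | Chapter_2_python/hw1.py | gen_list2
-- ===== SOURCE A (Python) =====
-- def gen_list2(n):
--     """
--         生成一个长度为5n的列表，要求其中不包含4的倍数，从小到大排列，两个元素之间间隔为1或2.
--     """
--     a = []
--     k = 10*n
--     for i in range(k):
--         if i % 4 != 0:
--             a.append(i)
--         if len(a) == 5*n:
--             break
--     res = a
--     return res
-- ===== SOURCE B (Python) =====
-- def gen_list2(n):
--     # closed form: the j-th non-multiple-of-4 (starting from 1) is (j//3)*4 + j%3 + 1
--     return [(j // 3) * 4 + j % 3 + 1 for j in range(5 * n)]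
-- ===== Notes on version B (the rewrite author's own statement) =====
-- stated objective: simpler
-- what changed: Replaces the rejection loop over range(10n) with its modulo filter and break by a direct closed-form list comprehension computing the j-th non-multiple of 4 as (j//3)*4 + j%3 + 1.
import Mathlib
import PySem

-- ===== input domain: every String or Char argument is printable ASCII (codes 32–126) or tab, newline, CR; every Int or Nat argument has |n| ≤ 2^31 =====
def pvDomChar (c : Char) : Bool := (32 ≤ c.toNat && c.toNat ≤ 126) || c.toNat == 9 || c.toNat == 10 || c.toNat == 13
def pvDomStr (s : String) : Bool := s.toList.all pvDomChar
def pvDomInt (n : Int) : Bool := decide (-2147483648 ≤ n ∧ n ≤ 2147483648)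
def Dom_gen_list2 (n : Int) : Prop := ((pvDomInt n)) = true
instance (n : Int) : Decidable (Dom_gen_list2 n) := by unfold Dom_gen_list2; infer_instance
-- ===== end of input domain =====

-- B replaces A's rejection scan over range(10n) with break by a closed-form comprehension (simpler).


-- ===== PORT A =====
-- the for-loop with its break, as structural recursion over the range list
def loopA : List Int → Int → List Int → List Int
  | [], _, a => a
  | i :: rest, t, a =>
    let a' := if PySem.Int.mod i 4 ≠ 0 then a ++ [i] else a
    if (a'.length : Int) = t then a' else loopA rest t a'

def gen_list2 (n : Int) : List Int :=
  loopA (PySem.List.pyRange 0 (10*n) 1) (5*n) []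

-- ===== PORT B =====
def gen_list2_alt (n : Int) : List Int :=
  (PySem.List.pyRange 0 (5*n) 1).map
    (fun j => PySem.Int.floordiv j 3 * 4 + PySem.Int.mod j 3 + 1)

-- ===== PRECONDITION & SPEC =====
def Spec_gen_list2 (n : Int) (out : List Int) : Prop := out = gen_list2_alt n
instance (n : Int) (out : List Int) : Decidable (Spec_gen_list2 n out) := by unfold Spec_gen_list2; infer_instance

-- ===== CLAIM (what is proved, stated in full; the proofs are below) =====
def Claim_equal_gen_list2 : Prop := ∀ (n : Int), Dom_gen_list2 n → Spec_gen_list2 n (gen_list2 n)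

-- ===== LEMMAS AND PROOFS =====

-- closed form of the j-th element, over Nat indices
def pvF (k : Nat) : Int := 4 * ((k / 3 : Nat) : Int) + ((k % 3 : Nat) : Int) + 1

lemma alt_eq (n : Int) :
    gen_list2_alt n = (List.range (5*n).toNat).map pvF := by
  unfold gen_list2_alt
  rw [PySem.List.pyRange_one]
  simp only [sub_zero, List.map_map]
  refine List.map_congr_left ?_
  intro k _
  simp [pvF]
  ring

lemma pvF_val (q : Nat) (r : Nat) (hr : r < 3) :
    pvF (3*q + r) = 4*(q:Int) + (r:Int) + 1 := by
  unfold pvF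
  have h1 : (3*q + r) / 3 = q := by omega
  have h2 : (3*q + r) % 3 = r := by omega
  rw [h1, h2]

lemma mod4 (x : Int) : PySem.Int.mod x 4 = x % 4 := by
  rw [PySem.Int.mod_eq_emod_of_pos]; omega

lemma acc_snoc (q r : Nat) (hr : r < 3) :
    (List.range (3*q + r)).map pvF ++ [4*(q:Int) + (r:Int) + 1]
      = (List.range (3*q + r + 1)).map pvF := by
  simp only [List.range_succ, List.map_append, List.map_cons, List.map_nil]
  rw [pvF_val q r hr]

lemma loopA_inv (n : Int) (hn : 1 ≤ n) :
    ∀ (m q : Nat), m = (5*n).toNat - 3*q → (3*(q:Int)) < 5*n →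
    loopA (PySem.List.pyRange (4*(q:Int)) (10*n) 1) (5*n) ((List.range (3*q)).map pvF)
      = (List.range (5*n).toNat).map pvF := by
  intro m
  induction m using Nat.strong_induction_on with
  | _ m ih =>
    intro q hm hq
    have ht : ((5*n).toNat : Int) = 5*n := by omega
    -- step i = 4q : multiple of 4, no append, no break
    rw [PySem.List.pyRange_one_cons (show 4*(q:Int) < 10*n by omega)]
    simp only [loopA, mod4]
    rw [if_neg (show ¬((4*(q:Int)) % 4 ≠ 0) from by omega),
        if_neg (show ¬((((List.range (3*q)).map pvF).length : Int) = 5*n) from by simp; omega)]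
    -- step i = 4q+1 : append, length 3q+1
    rw [PySem.List.pyRange_one_cons (show 4*(q:Int)+1 < 10*n by omega)]
    simp only [loopA, mod4]
    rw [if_pos (show (4*(q:Int)+1) % 4 ≠ 0 from by omega)]
    have e1 : (List.range (3*q)).map pvF ++ [4*(q:Int)+1] = (List.range (3*q+1)).map pvF := by
      have := acc_snoc q 0 (by omega); simpa using this
    rw [e1]
    by_cases h1 : (5*n) = 3*(q:Int) + 1
    · rw [if_pos (show (((List.range (3*q+1)).map pvF).length : Int) = 5*n from by simp; omega)]
      have : (5*n).toNat = 3*q+1 := by omega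
      rw [this]
    · rw [if_neg (show ¬((((List.range (3*q+1)).map pvF).length : Int) = 5*n) from by simp; omega)]
      -- step i = 4q+2 : append, length 3q+2
      rw [show 4*(q:Int)+1+1 = 4*(q:Int)+2 from by ring]
      rw [PySem.List.pyRange_one_cons (show 4*(q:Int)+2 < 10*n by omega)]
      simp only [loopA, mod4]
      rw [if_pos (show (4*(q:Int)+2) % 4 ≠ 0 from by omega)]
      have e2 : (List.range (3*q+1)).map pvF ++ [4*(q:Int)+2] = (List.range (3*q+2)).map pvF := by
        have := acc_snoc q 1 (by omega)
        simpa [show 3*q+1+1 = 3*q+2 by omega] using this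
      rw [e2]
      by_cases h2 : (5*n) = 3*(q:Int) + 2
      · rw [if_pos (show (((List.range (3*q+2)).map pvF).length : Int) = 5*n from by simp; omega)]
        have : (5*n).toNat = 3*q+2 := by omega
        rw [this]
      · rw [if_neg (show ¬((((List.range (3*q+2)).map pvF).length : Int) = 5*n) from by simp; omega)]
        -- step i = 4q+3 : append, length 3q+3
        rw [show 4*(q:Int)+2+1 = 4*(q:Int)+3 from by ring]
        rw [PySem.List.pyRange_one_cons (show 4*(q:Int)+3 < 10*n by omega)]
        simp only [loopA, mod4]
        rw [if_pos (show (4*(q:Int)+3) % 4 ≠ 0 from by omega)]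
        have e3 : (List.range (3*q+2)).map pvF ++ [4*(q:Int)+3] = (List.range (3*q+3)).map pvF := by
          have := acc_snoc q 2 (by omega)
          simpa [show 3*q+2+1 = 3*q+3 by omega] using this
        rw [e3]
        by_cases h3 : (5*n) = 3*(q:Int) + 3
        · rw [if_pos (show (((List.range (3*q+3)).map pvF).length : Int) = 5*n from by simp; omega)]
          have : (5*n).toNat = 3*q+3 := by omega
          rw [this]
        · rw [if_neg (show ¬((((List.range (3*q+3)).map pvF).length : Int) = 5*n) from by simp; omega)]
          have hrec := ih ((5*n).toNat - 3*(q+1)) (by omega) (q+1) rfl (by push_cast; omega)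
          have heq : (4*((q+1:Nat):Int)) = 4*(q:Int) + 4 := by push_cast; ring
          rw [heq] at hrec
          rw [show 4*(q:Int)+3+1 = 4*(q:Int)+4 from by ring]
          have hacc : (3*(q+1)) = 3*q+3 := by omega
          rw [hacc] at hrec
          exact hrec

-- ===== VERDICT (by name: the statement is the Claim_ definition above) =====
theorem gen_list2_spec : Claim_equal_gen_list2 := by
  intro n _
  unfold Spec_gen_list2
  by_cases hn : n ≤ 0
  · have h10 : PySem.List.pyRange 0 (10*n) 1 = [] :=
      PySem.List.pyRange_one_eq_nil (by omega)
    have h5 : PySem.List.pyRange 0 (5*n) 1 = [] :=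
      PySem.List.pyRange_one_eq_nil (by omega)
    simp [gen_list2, gen_list2_alt, h10, h5, loopA]
  · rw [alt_eq]
    unfold gen_list2
    have := loopA_inv n (by omega) ((5*n).toNat - 3*0) 0 rfl (by omega)
    simpa using this
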